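-- pv_equiv track=rewrite | github.com/JayPrakash916/IMDB-Scraper | task2.py | gruop_by_year
-- ===== SOURCE A (Python) =====
-- def gruop_by_year(movies):
-- 	dict_year={}
-- 	for i in movies:
-- 		a=i["Year"]
-- 		if a not in dict_year:
-- 			dict_year[a]=[]
-- 			dict_year[a].append(i)
-- 		else:
-- 			dict_year[a].append(i)
--
-- 	return dict_year
-- ===== SOURCE B (Python) =====
-- def gruop_by_year(movies):
-- 	# Two-pass decomposition: first the distinct years in first-occurrence
-- 	# order, then one filter pass per year (instead of A's single-pass
-- 	# hash accumulation).
-- 	years = list(dict.fromkeys(m["Year"] for m in movies))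
-- 	return {y: [m for m in movies if m["Year"] == y] for y in years}
-- ===== Notes on version B (the rewrite author's own statement) =====
-- stated objective: alternative
-- what changed: Replaces A's single-pass dict accumulation (check membership, create-then-append) by a two-pass decomposition: an ordered dedup of the years followed by one list-comprehension filter per distinct year.
import Mathlib
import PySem

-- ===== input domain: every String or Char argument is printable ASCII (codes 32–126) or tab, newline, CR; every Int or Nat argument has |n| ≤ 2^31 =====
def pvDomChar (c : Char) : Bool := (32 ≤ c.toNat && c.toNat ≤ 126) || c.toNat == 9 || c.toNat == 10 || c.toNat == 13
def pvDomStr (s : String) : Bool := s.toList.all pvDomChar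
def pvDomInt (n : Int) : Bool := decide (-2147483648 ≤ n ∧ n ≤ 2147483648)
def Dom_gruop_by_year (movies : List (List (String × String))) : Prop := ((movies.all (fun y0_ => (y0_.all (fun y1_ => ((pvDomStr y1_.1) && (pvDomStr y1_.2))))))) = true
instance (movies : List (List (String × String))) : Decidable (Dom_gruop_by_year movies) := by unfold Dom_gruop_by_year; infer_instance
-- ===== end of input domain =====

-- B replaces A's single-pass dict accumulation by an ordered dedup of the years followed by one filter pass per year (alternative decomposition, same results).


-- ===== PORT A =====
-- for i in movies: a = i["Year"]; if a not in dict_year: dict_year[a]=[]; dict_year[a].append(i) else: dict_year[a].append(i)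
-- i["Year"] raises KeyError when missing (PySem.Dict.get? = none there); that case is excluded by Pre_ and the port returns d unchanged.
def gruop_by_year (movies : List (List (String × String))) : List (String × List (List (String × String))) :=
  (movies.foldl (fun d i =>
    match (PySem.Dict.mk i).get? "Year" with
    | none => d
    | some a =>
      if d.contains a = false then
        (d.insert a []).modify a [] (fun l => l ++ [i])
      else
        d.modify a [] (fun l => l ++ [i])) PySem.Dict.empty).items

-- ===== PORT B =====
-- years = list(dict.fromkeys(m["Year"] for m in movies))  →  PySem.List.dedup; on a movie missing "Year"
-- the Python raises (excluded by Pre_), the port uses the default "".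
-- {y: [m for m in movies if m["Year"] == y] for y in years} built as a fold of inserts, returned as items.
def gruop_by_year_alt (movies : List (List (String × String))) : List (String × List (List (String × String))) :=
  let years : List String :=
    PySem.List.dedup (movies.map (fun m => ((PySem.Dict.mk m).get? "Year").getD ""))
  (years.foldl (fun d y =>
    d.insert y (movies.filter (fun m => (PySem.Dict.mk m).get? "Year" == some y)))
    PySem.Dict.empty).items

-- ===== PRECONDITION & SPEC =====
-- Pre_ excludes exactly the movies lacking a "Year" key, on which Python A raises KeyError.
def Pre_gruop_by_year (movies : List (List (String × String))) : Prop :=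
  ∀ m ∈ movies, (PySem.Dict.mk m).contains "Year" = true
instance (movies : List (List (String × String))) : Decidable (Pre_gruop_by_year movies) := by unfold Pre_gruop_by_year; infer_instance
def pvWitness_gruop_by_year : (List (List (String × String))) :=
  [[("Year", "2001"), ("Title", "A")], [("Year", "1999"), ("Title", "B")], [("Year", "2001"), ("Title", "C")]]

def Spec_gruop_by_year (movies : List (List (String × String))) (out : List (String × List (List (String × String)))) : Prop := out = gruop_by_year_alt movies
instance (movies : List (List (String × String))) (out : List (String × List (List (String × String)))) : Decidable (Spec_gruop_by_year movies out) := by unfold Spec_gruop_by_year; infer_instance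

-- ===== CLAIM (what is proved, stated in full; the proofs are below) =====
def Claim_equal_gruop_by_year : Prop := ∀ (movies : List (List (String × String))), Dom_gruop_by_year movies → Pre_gruop_by_year movies → Spec_gruop_by_year movies (gruop_by_year movies)

-- ===== LEMMAS AND PROOFS =====

-- the year of a movie, with default "" (under Pre_ the default is never used)
def pvKey (m : List (String × String)) : String := ((PySem.Dict.mk m).get? "Year").getD ""

-- A's loop body, under Pre_, is exactly 'modify (pvKey i) [] (· ++ [i])'
theorem pvStepA_eq (d : PySem.Dict String (List (List (String × String)))) (i : List (String × String))
    (h : (PySem.Dict.mk i).contains "Year" = true) :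
    (match (PySem.Dict.mk i).get? "Year" with
     | none => d
     | some a =>
       if d.contains a = false then
         (d.insert a []).modify a [] (fun l => l ++ [i])
       else
         d.modify a [] (fun l => l ++ [i])) = d.modify (pvKey i) [] (fun l => l ++ [i]) := by
  rw [PySem.Dict.contains_eq_isSome_get?] at h
  rcases ho : (PySem.Dict.mk i).get? "Year" with _ | a
  · rw [ho] at h; simp at h
  · have hk : pvKey i = a := by simp [pvKey, ho]
    rw [hk]
    by_cases hc : d.contains a = true
    · simp [hc]
    · have hc' : d.contains a = false := by simpa using hc
      simp only [hc']
      rw [if_pos trivial]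
      rw [PySem.Dict.modify, PySem.Dict.modify,
          PySem.Dict.getD_insert_self, PySem.Dict.insert_insert_self,
          PySem.Dict.getD_of_not_contains _ _ hc']

theorem pvMain (movies : List (List (String × String))) (hpre : Pre_gruop_by_year movies) :
    gruop_by_year movies = gruop_by_year_alt movies := by
  unfold gruop_by_year gruop_by_year_alt
  have hA : List.foldl (fun d i =>
      match (PySem.Dict.mk i).get? "Year" with
      | none => d
      | some a =>
        if d.contains a = false then
          (d.insert a []).modify a [] (fun l => l ++ [i])
        else
          d.modify a [] (fun l => l ++ [i])) PySem.Dict.empty movies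
      = List.foldl (fun d m => d.modify (pvKey m) [] (fun l => l ++ [m])) PySem.Dict.empty movies :=
    PySem.List.foldl_congr_mem movies _ _ _ (fun acc m hm => pvStepA_eq acc m (hpre m hm))
  rw [hA]
  set D := List.foldl (fun d m => d.modify (pvKey m) [] (fun l => l ++ [m])) PySem.Dict.empty movies with hD
  have hnd : D.keys.Nodup := by
    apply PySem.Dict.nodup_keys_foldl_modify_key
    simp [PySem.Dict.keys_empty]
  have hkeys : D.keys = PySem.Set.ofList (movies.map pvKey) := by
    rw [hD, PySem.Dict.keys_foldl_modify_key, PySem.Dict.keys_empty, PySem.Set.update_nil_left]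
  have hgetD : ∀ c, D.getD c [] = movies.filter (fun m => pvKey m == c) := by
    intro c
    have h := PySem.Dict.getD_foldl_modify_append (movies.map (fun m => (pvKey m, m))) PySem.Dict.empty c
    rw [List.foldl_map] at h
    simp only [PySem.Dict.getD_empty, List.nil_append, List.filter_map] at h
    rw [hD]
    rw [h]
    simp [Function.comp_def]
  have hfilter : ∀ c : String, movies.filter (fun m => pvKey m == c)
      = movies.filter (fun m => (PySem.Dict.mk m).get? "Year" == some c) := by
    intro c
    apply List.filter_congr
    intro m hm
    have hc := hpre m hm
    rw [PySem.Dict.contains_eq_isSome_get?] at hc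
    rcases ho : (PySem.Dict.mk m).get? "Year" with _ | a
    · rw [ho] at hc; simp at hc
    · simp [pvKey, ho]
  have hB : (List.foldl (fun d y =>
      d.insert y (movies.filter (fun m => (PySem.Dict.mk m).get? "Year" == some y)))
      PySem.Dict.empty (PySem.List.dedup (movies.map (fun m => ((PySem.Dict.mk m).get? "Year").getD "")))).items
      = (PySem.Set.ofList (movies.map pvKey)).map
          (fun y => (y, movies.filter (fun m => (PySem.Dict.mk m).get? "Year" == some y))) := by
    have hded : PySem.List.dedup (movies.map (fun m => ((PySem.Dict.mk m).get? "Year").getD ""))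
        = PySem.Set.ofList (movies.map pvKey) := by
      rw [PySem.List.dedup_eq_ofList]; rfl
    rw [hded]
    have := PySem.Dict.items_foldl_insert_fresh (PySem.Set.ofList (movies.map pvKey))
      (fun y => y)
      (fun y => movies.filter (fun m => (PySem.Dict.mk m).get? "Year" == some y))
      PySem.Dict.empty
      (fun a _ => PySem.Dict.contains_empty a)
      (by simp [PySem.Set.nodup_ofList])
    simpa using this
  rw [hB, PySem.Dict.items_eq_map_keys D hnd [], hkeys]
  apply List.map_congr_left
  intro y _
  rw [hgetD y, hfilter y]

-- ===== VERDICT (by name: the statement is the Claim_ definition above) =====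
theorem gruop_by_year_spec : Claim_equal_gruop_by_year := by
  intro movies _hdom hpre
  unfold Spec_gruop_by_year
  exact pvMain movies hpre
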